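-- pv_equiv track=rewrite | github.com/qkzk/advent_of_code | 06/custom_access.py | part_two
-- ===== SOURCE A (Python) =====
-- def part_two(inputs: list) -> int:
--     letters = set()
--     counts = []
--     new = True
--     for line in inputs:
--         if not line.strip():
--             count = len(letters)
--             counts.append(count)
--             letters = set()
--             new = True
--         else:
--             if new:
--                 new = False
--                 letters = set(line)
--             else:
--                 letters.intersection_update(set(line))
--
--     count = len(letters)
--     counts.append(count)
--     return sum(counts)
-- ===== SOURCE B (Python) =====
-- def part_two(inputs: list) -> int:
--     # two-phase: partition lines into groups at blank lines, then sum the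
--     # sizes of per-group character intersections (raw lines, as in A)
--     groups = []
--     current = []
--     for line in inputs:
--         if not line.strip():
--             groups.append(current)
--             current = []
--         else:
--             current.append(line)
--     groups.append(current)
--     total = 0
--     for group in groups:
--         if group:
--             common = set(group[0])
--             for line in group[1:]:
--                 common &= set(line)
--             total += len(common)
--     return total
-- ===== Notes on version B (the rewrite author's own statement) =====
-- stated objective: alternative
-- what changed: Replaces A's single pass with mutable set/flag/counts state by a two-phase decomposition: first partition the lines into blank-separated groups, then sum each group's character-set intersection size.
import Mathlib
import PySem

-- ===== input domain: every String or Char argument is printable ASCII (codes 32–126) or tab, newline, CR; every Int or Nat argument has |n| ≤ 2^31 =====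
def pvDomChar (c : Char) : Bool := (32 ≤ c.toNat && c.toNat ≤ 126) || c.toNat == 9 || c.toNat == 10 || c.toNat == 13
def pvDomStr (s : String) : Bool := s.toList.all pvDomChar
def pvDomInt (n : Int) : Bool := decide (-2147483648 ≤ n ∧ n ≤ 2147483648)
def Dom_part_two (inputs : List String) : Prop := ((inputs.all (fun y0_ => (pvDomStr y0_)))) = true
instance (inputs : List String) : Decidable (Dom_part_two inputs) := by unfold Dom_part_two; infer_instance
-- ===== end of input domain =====

-- B is an alternative decomposition (partition into groups, then sum intersections); same cost.

-- ===== PORT A =====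
-- state: (letters : set, counts : list, new : bool), exactly A's loop
def part_two_stepA (st : PySem.Set Char × List Int × Bool) (line : String) :
    PySem.Set Char × List Int × Bool :=
  let letters := st.1
  let counts := st.2.1
  let new := st.2.2
  if PySem.Str.strip line = "" then
    (PySem.Set.empty, counts ++ [PySem.Set.len letters], true)
  else
    if new then
      (PySem.Set.ofList line.toList, counts, false)
    else
      (PySem.Set.inter letters line.toList, counts, new)

def part_two (inputs : List String) : Int :=
  let st := inputs.foldl part_two_stepA (PySem.Set.empty, [], true)
  (st.2.1 ++ [PySem.Set.len st.1]).sum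

-- ===== PORT B =====
-- phase 1: partition into blank-separated groups
def part_two_stepB (st : List (List String) × List String) (line : String) :
    List (List String) × List String :=
  if PySem.Str.strip line = "" then (st.1 ++ [st.2], [])
  else (st.1, st.2 ++ [line])

-- phase 2: one group's contribution (intersection size; empty group gives 0)
def part_two_groupB (total : Int) (group : List String) : Int :=
  match group with
  | [] => total
  | first :: rest =>
    let common := rest.foldl (fun c line => PySem.Set.inter c line.toList)
      (PySem.Set.ofList first.toList)
    total + PySem.Set.len common

def part_two_alt (inputs : List String) : Int :=
  let st := inputs.foldl part_two_stepB ([], [])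
  let groups := st.1 ++ [st.2]
  groups.foldl part_two_groupB 0

-- ===== PRECONDITION & SPEC =====
def Spec_part_two (inputs : List String) (out : Int) : Prop := out = part_two_alt inputs
instance (inputs : List String) (out : Int) : Decidable (Spec_part_two inputs out) := by unfold Spec_part_two; infer_instance

-- ===== CLAIM (what is proved, stated in full; the proofs are below) =====
def Claim_equal_part_two : Prop := ∀ (inputs : List String), Dom_part_two inputs → Spec_part_two inputs (part_two inputs)

-- ===== LEMMAS AND PROOFS =====

-- the common-letter set of a group, as A maintains it ([] ↦ empty set)
def pvCommon (g : List String) : PySem.Set Char :=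
  match g with
  | [] => PySem.Set.empty
  | first :: rest => rest.foldl (fun c line => PySem.Set.inter c line.toList)
      (PySem.Set.ofList first.toList)

-- one group's count
def pvCount (g : List String) : Int := PySem.Set.len (pvCommon g)

theorem pvCommon_snoc (g : List String) (line : String) (h : g ≠ []) :
    pvCommon (g ++ [line]) = PySem.Set.inter (pvCommon g) line.toList := by
  cases g with
  | nil => exact absurd rfl h
  | cons a t => simp [pvCommon, List.foldl_append]

theorem groupB_eq (total : Int) (g : List String) :
    part_two_groupB total g = total + pvCount g := by
  cases g <;> simp [part_two_groupB, pvCount, pvCommon, PySem.Set.len, PySem.Set.empty]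

theorem foldl_groupB (gs : List (List String)) (total : Int) :
    gs.foldl part_two_groupB total = total + (gs.map pvCount).sum := by
  induction gs generalizing total with
  | nil => simp
  | cons g t ih => simp [List.foldl_cons, groupB_eq, ih]; ring

-- loop invariant: A's state is determined by B's (groups, current)
theorem loop_inv (inputs : List String) (groups : List (List String)) (current : List String) :
    inputs.foldl part_two_stepA (pvCommon current, groups.map pvCount, current.isEmpty) =
    (pvCommon (inputs.foldl part_two_stepB (groups, current)).2,
     (inputs.foldl part_two_stepB (groups, current)).1.map pvCount,
     (inputs.foldl part_two_stepB (groups, current)).2.isEmpty) := by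
  induction inputs generalizing groups current with
  | nil => simp
  | cons line rest ih =>
    by_cases hb : PySem.Str.strip line = ""
    · have h1 : part_two_stepA (pvCommon current, groups.map pvCount, current.isEmpty) line
          = (pvCommon ([] : List String), ((groups ++ [current]).map pvCount),
             ([] : List String).isEmpty) := by
        simp [part_two_stepA, hb, pvCommon, pvCount, PySem.Set.empty]
      have h2 : part_two_stepB (groups, current) line = (groups ++ [current], []) := by
        simp [part_two_stepB, hb]
      simp only [List.foldl_cons, h1, h2]
      exact ih _ _
    · cases current with
      | nil =>
        have h1 : part_two_stepA (pvCommon ([] : List String), groups.map pvCount,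
              ([] : List String).isEmpty) line
            = (pvCommon [line], groups.map pvCount, ([line]).isEmpty) := by
          simp [part_two_stepA, hb, pvCommon]
        have h2 : part_two_stepB (groups, ([] : List String)) line = (groups, [line]) := by
          simp [part_two_stepB, hb]
        simp only [List.foldl_cons, h1, h2]
        exact ih _ _
      | cons a t =>
        have h1 : part_two_stepA (pvCommon (a :: t), groups.map pvCount,
              (a :: t).isEmpty) line
            = (pvCommon ((a :: t) ++ [line]), groups.map pvCount,
               ((a :: t) ++ [line]).isEmpty) := by
          rw [pvCommon_snoc _ _ (by simp)]
          simp [part_two_stepA, hb]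
        have h2 : part_two_stepB (groups, a :: t) line = (groups, (a :: t) ++ [line]) := by
          simp [part_two_stepB, hb]
        simp only [List.foldl_cons, h1, h2]
        exact ih _ _

-- ===== VERDICT (by name: the statement is the Claim_ definition above) =====
theorem part_two_spec : Claim_equal_part_two := by
  intro inputs _
  unfold Spec_part_two part_two part_two_alt
  have h0 : (PySem.Set.empty, ([] : List Int), true)
      = (pvCommon ([] : List String), ([] : List (List String)).map pvCount,
         ([] : List String).isEmpty) := by
    simp [pvCommon]
  rw [h0, loop_inv]
  simp [foldl_groupB, groupB_eq, pvCount]
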